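-- pv_equiv track=rewrite | github.com/Beautiful-Game-Oracle/The-Beautiful-Game-Oracle | analysis/sync_run_history.py | _infer_dataset_label
-- ===== SOURCE A (Python) =====
-- from typing import Dict, Iterable, Tuple
--
-- def _infer_dataset_label(feature_cols: Iterable[str]) -> str:
--     cols = [str(col) for col in (feature_cols or [])]
--     lowered = [col.lower() for col in cols]
--     if any("shot" in col for col in lowered) or any(col.startswith("elo_") for col in lowered):
--         return "Dataset_V3"
--     if any("market_expected_points" in col for col in lowered):
--         return "Dataset_V2"
--     return "Dataset_V1"
-- ===== SOURCE B (Python) =====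
-- _LABELS = ("Dataset_V1", "Dataset_V2", "Dataset_V3")
--
--
-- def _rank(col):
--     c = str(col).lower()
--     if "shot" in c or c.startswith("elo_"):
--         return 3
--     if "market_expected_points" in c:
--         return 2
--     return 1
--
--
-- def _infer_dataset_label(feature_cols):
--     best = max(map(_rank, feature_cols or []), default=1)
--     return _LABELS[best - 1]
-- ===== Notes on version B (the rewrite author's own statement) =====
-- stated objective: alternative
-- what changed: Reduces the three prioritized global any(...) scans to a per-column rank (3/2/1), takes the maximum rank with max(..., default=1), and indexes a label table; priority is encoded in the rank order instead of branch order.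
import Mathlib
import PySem

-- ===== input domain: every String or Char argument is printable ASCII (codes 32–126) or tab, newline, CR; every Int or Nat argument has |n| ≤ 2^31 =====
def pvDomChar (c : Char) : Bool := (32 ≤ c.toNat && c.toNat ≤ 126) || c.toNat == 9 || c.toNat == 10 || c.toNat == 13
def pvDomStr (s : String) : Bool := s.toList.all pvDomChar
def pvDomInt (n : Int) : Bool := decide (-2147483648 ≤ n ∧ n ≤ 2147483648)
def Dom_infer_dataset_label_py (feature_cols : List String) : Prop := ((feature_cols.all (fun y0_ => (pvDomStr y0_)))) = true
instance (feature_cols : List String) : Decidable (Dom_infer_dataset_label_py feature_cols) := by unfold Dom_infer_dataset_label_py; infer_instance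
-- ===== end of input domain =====

-- B replaces A's prioritized any(...) scans with a per-column rank, a max-reduction and a label table (alternative decomposition, same cost).

-- ===== PORT A =====
def infer_dataset_label_py (feature_cols : List String) : String :=
  let cols := feature_cols.map (fun col => col)      -- str(col) on a str is the identity
  let lowered := cols.map (fun col => PySem.Str.lower col)
  if lowered.any (fun col => PySem.Str.isIn "shot" col) ||
     lowered.any (fun col => PySem.Str.startswith col "elo_") then "Dataset_V3"
  else if lowered.any (fun col => PySem.Str.isIn "market_expected_points" col) then "Dataset_V2"
  else "Dataset_V1"

-- ===== PORT B =====
def pvRank (col : String) : Int :=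
  let c := PySem.Str.lower col
  if PySem.Str.isIn "shot" c || PySem.Str.startswith c "elo_" then 3
  else if PySem.Str.isIn "market_expected_points" c then 2
  else 1

def infer_dataset_label_py_alt (feature_cols : List String) : String :=
  let best := PySem.List.maxD (feature_cols.map pvRank) (fun x => x) 1
  -- _LABELS[best - 1]; best ∈ {1,2,3} so the index is always in range (getD's "" is unreachable)
  (PySem.List.pyGet? ["Dataset_V1", "Dataset_V2", "Dataset_V3"] (best - 1)).getD ""

-- ===== PRECONDITION & SPEC =====
def Spec_infer_dataset_label_py (feature_cols : List String) (out : String) : Prop := out = infer_dataset_label_py_alt feature_cols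
instance (feature_cols : List String) (out : String) : Decidable (Spec_infer_dataset_label_py feature_cols out) := by unfold Spec_infer_dataset_label_py; infer_instance

-- ===== CLAIM (what is proved, stated in full; the proofs are below) =====
def Claim_equal_infer_dataset_label_py : Prop := ∀ (feature_cols : List String), Dom_infer_dataset_label_py feature_cols → Spec_infer_dataset_label_py feature_cols (infer_dataset_label_py feature_cols)

-- ===== LEMMAS AND PROOFS =====

-- the "top rank so far" of a list of columns, as A's prioritized tests would compute it
def pvTop (l : List String) : Int :=
  if l.any (fun c => PySem.Str.isIn "shot" (PySem.Str.lower c) || PySem.Str.startswith (PySem.Str.lower c) "elo_") then 3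
  else if l.any (fun c => PySem.Str.isIn "market_expected_points" (PySem.Str.lower c)) then 2
  else 1

theorem pvIf_max (a b c d : Bool) :
    max (if a = true then (3:Int) else if b = true then 2 else 1)
        (if c = true then 3 else if d = true then 2 else 1)
      = if (a || c) = true then 3 else if (b || d) = true then 2 else 1 := by
  cases a <;> cases b <;> cases c <;> cases d <;> simp


theorem pvTop_cons (x : String) (l : List String) : max (pvRank x) (pvTop l) = pvTop (x :: l) := by
  unfold pvRank pvTop
  dsimp only
  simp only [List.any_cons]
  rw [pvIf_max]
  rfl

theorem pvFoldl_max_rank (l : List String) (a : Int) (ha : 1 ≤ a) :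
    (l.map pvRank).foldl max a = max a (pvTop l) := by
  induction l generalizing a with
  | nil =>
    simp [pvTop]
    omega
  | cons x xs ih =>
    have hr : 1 ≤ max a (pvRank x) := le_trans ha (le_max_left _ _)
    simp only [List.map_cons, List.foldl_cons]
    rw [ih _ hr, max_assoc, pvTop_cons]

theorem pvRank_ge_one (x : String) : 1 ≤ pvRank x := by
  simp only [pvRank]; split_ifs <;> norm_num

theorem pvBest_eq_top (l : List String) :
    PySem.List.maxD (l.map pvRank) (fun x => x) 1 = pvTop l := by
  cases l with
  | nil => simp [PySem.List.maxD, PySem.List.max?, pvTop]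
  | cons x xs =>
    unfold PySem.List.maxD
    rw [List.map_cons, PySem.List.max?_id_cons]
    simp only [Option.getD_some]
    rw [pvFoldl_max_rank xs (pvRank x) (pvRank_ge_one x), pvTop_cons]

theorem pvAny_or (l : List String) (p q : String → Bool) :
    l.any (fun c => p c || q c) = (l.any p || l.any q) := by
  induction l with
  | nil => rfl
  | cons x xs ih => simp only [List.any_cons, ih]; cases p x <;> cases q x <;> simp

-- ===== VERDICT (by name: the statement is the Claim_ definition above) =====
theorem infer_dataset_label_py_spec : Claim_equal_infer_dataset_label_py := by
  intro l _
  show infer_dataset_label_py l = infer_dataset_label_py_alt l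
  unfold infer_dataset_label_py infer_dataset_label_py_alt
  rw [pvBest_eq_top]
  unfold pvTop
  simp only [List.map_id', List.any_map, Function.comp_def, pvAny_or]
  split_ifs <;> decide
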